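-- pv_equiv track=rewrite | github.com/aman-ash/DSA_Questions | String_Minimum_words.py | minimumCharactersForWords
-- ===== SOURCE A (Python) =====
-- def minimumCharactersForWords(words):
--     answer = {}
--
--     for word in words:
--         temp = {}
--         for char in word:
--             if char in temp:
--                 temp[char] += 1
--             else:
--                 temp[char] = 1
--         for key, value in temp.items():
--             if key in answer:
--                 if answer[key] >= temp[key]:
--                     pass
--                 else:
--                     answer[key] += temp[key] - answer[key]
--             else:
--                 answer[key] = value
--     ans = ''
--     for key, value in answer.items():
--         ans += key * value
--     return list(ans)
-- ===== SOURCE B (Python) =====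
-- def minimumCharactersForWords(words):
--     # Collect the distinct characters in first-appearance order, then rescan
--     # the words once per character taking the maximum per-word count.
--     seen = []
--     for w in words:
--         for ch in w:
--             if ch not in seen:
--                 seen.append(ch)
--     out = []
--     for c in seen:
--         best = 0
--         for w in words:
--             k = w.count(c)
--             if k > best:
--                 best = k
--         out += [c] * best
--     return out
-- ===== Notes on version B (the rewrite author's own statement) =====
-- stated objective: alternative
-- what changed: A makes one pass building a per-word counter dict and merging it into a running-max dict; B first collects the distinct characters in first-appearance order, then rescans the words once per character with str.count to take the maximum count.
import Mathlib
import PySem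

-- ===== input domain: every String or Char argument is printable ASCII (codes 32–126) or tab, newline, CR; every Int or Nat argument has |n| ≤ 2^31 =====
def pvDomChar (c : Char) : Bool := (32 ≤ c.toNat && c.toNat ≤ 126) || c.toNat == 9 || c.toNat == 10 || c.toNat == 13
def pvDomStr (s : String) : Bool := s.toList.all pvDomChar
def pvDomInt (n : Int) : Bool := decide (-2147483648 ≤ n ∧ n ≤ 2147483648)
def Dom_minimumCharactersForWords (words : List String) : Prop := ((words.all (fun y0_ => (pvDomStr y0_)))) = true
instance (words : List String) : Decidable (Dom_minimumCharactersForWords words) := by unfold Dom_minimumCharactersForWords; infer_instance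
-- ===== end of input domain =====

-- B replaces A's dict-merging single pass with collect-distinct-characters-then-rescan-per-character; same cost class, alternative shape.


-- ===== PORT A =====
def minimumCharactersForWords (words : List String) : List String :=
  let answer : PySem.Dict Char Int :=
    words.foldl (fun answer word =>
      let temp : PySem.Dict Char Int :=
        word.toList.foldl (fun temp char =>
          if temp.contains char then temp.insert char (temp.getD char 0 + 1)
          else temp.insert char 1) PySem.Dict.empty
      temp.items.foldl (fun answer kv =>
        if answer.contains kv.1 then
          if answer.getD kv.1 0 ≥ temp.getD kv.1 0 then answer
          else answer.insert kv.1 (answer.getD kv.1 0 + (temp.getD kv.1 0 - answer.getD kv.1 0))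
        else answer.insert kv.1 kv.2) answer) PySem.Dict.empty
  let ans : List Char :=
    answer.items.foldl (fun ans kv => ans ++ PySem.List.pyRepeat [kv.1] kv.2) []
  ans.map (fun c => String.ofList [c])

-- ===== PORT B =====
def minimumCharactersForWords_alt (words : List String) : List String :=
  let seen : PySem.Set Char :=
    words.foldl (fun seen w => w.toList.foldl (fun s ch => PySem.Set.add s ch) seen) PySem.Set.empty
  seen.foldl (fun out c =>
    let best : Int :=
      -- w.count(c) for a one-character c is the number of occurrences of c: List.count (exact)
      words.foldl (fun best w =>
        if ((w.toList.count c : Int)) > best then (w.toList.count c : Int) else best) 0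
    out ++ PySem.List.pyRepeat [String.ofList [c]] best) []

-- ===== PRECONDITION & SPEC =====
def Spec_minimumCharactersForWords (words : List String) (out : List String) : Prop := out = minimumCharactersForWords_alt words
instance (words : List String) (out : List String) : Decidable (Spec_minimumCharactersForWords words out) := by unfold Spec_minimumCharactersForWords; infer_instance

-- ===== CLAIM (what is proved, stated in full; the proofs are below) =====
def Claim_equal_minimumCharactersForWords : Prop := ∀ (words : List String), Dom_minimumCharactersForWords words → Spec_minimumCharactersForWords words (minimumCharactersForWords words)

-- ===== LEMMAS AND PROOFS =====

-- the canonical per-character value both programs compute: max over the words of the count of c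
def pvMaxCount (words : List String) (c : Char) : Int :=
  words.foldl (fun m w => max m ((w.toList.count c : Int))) 0

-- A's inner counting loop builds Counter(word)
theorem pvTempEq (w : List Char) :
    w.foldl (fun temp char =>
      if temp.contains char then temp.insert char (temp.getD char 0 + 1)
      else temp.insert char 1) PySem.Dict.empty = PySem.Dict.counter w := by
  rw [← PySem.Dict.foldl_insert_getD_add_one_eq_counter]
  apply PySem.List.foldl_congr_mem
  intro d ch _
  by_cases h : d.contains ch
  · simp [h]
  · simp only [Bool.not_eq_true] at h
    simp [h, PySem.Dict.getD_of_not_contains _ _ h]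

-- A's merge step for one word, with temp already identified as Counter(w)
def pvMerge (w : List Char) (d : PySem.Dict Char Int) : PySem.Dict Char Int :=
  (PySem.Dict.counter w).items.foldl (fun answer kv =>
    if answer.contains kv.1 then
      if answer.getD kv.1 0 ≥ (PySem.Dict.counter w).getD kv.1 0 then answer
      else answer.insert kv.1 (answer.getD kv.1 0 + ((PySem.Dict.counter w).getD kv.1 0 - answer.getD kv.1 0))
    else answer.insert kv.1 kv.2) d

-- keys after one merge-fold step: the key is added (appended if new)
theorem pvMergeStepKeys (w : List Char) (d : PySem.Dict Char Int) (kv : Char × Int) :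
    (if d.contains kv.1 then
      if d.getD kv.1 0 ≥ (PySem.Dict.counter w).getD kv.1 0 then d
      else d.insert kv.1 (d.getD kv.1 0 + ((PySem.Dict.counter w).getD kv.1 0 - d.getD kv.1 0))
    else d.insert kv.1 kv.2).keys = PySem.Set.add d.keys kv.1 := by
  by_cases hc : d.contains kv.1
  · have hm : kv.1 ∈ d.keys := (PySem.Dict.contains_iff_mem_keys d kv.1).mp hc
    rw [PySem.Set.add_of_mem hm]
    simp only [hc, if_true]
    split
    · rfl
    · exact PySem.Dict.keys_insert_of_contains d _ hc
  · have hcf : d.contains kv.1 = false := by simpa using hc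
    have hm : kv.1 ∉ d.keys := fun h => hc ((PySem.Dict.contains_iff_mem_keys d kv.1).mpr h)
    rw [PySem.Set.add_of_not_mem hm]
    simp only [hcf, Bool.false_eq_true, if_false]
    exact PySem.Dict.keys_insert_of_not_contains d _ hcf

theorem pvMergeFoldKeys (w : List Char) (L : List (Char × Int)) (d : PySem.Dict Char Int) :
    (L.foldl (fun answer kv =>
      if answer.contains kv.1 then
        if answer.getD kv.1 0 ≥ (PySem.Dict.counter w).getD kv.1 0 then answer
        else answer.insert kv.1 (answer.getD kv.1 0 + ((PySem.Dict.counter w).getD kv.1 0 - answer.getD kv.1 0))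
      else answer.insert kv.1 kv.2) d).keys = PySem.Set.update d.keys (L.map (·.1)) := by
  induction L generalizing d with
  | nil => rfl
  | cons kv L ih =>
    rw [List.foldl_cons, List.map_cons, PySem.Set.update_cons, ih, pvMergeStepKeys]

theorem pvMergeKeys (w : List Char) (d : PySem.Dict Char Int) :
    (pvMerge w d).keys = PySem.Set.update d.keys (PySem.Set.ofList w) := by
  unfold pvMerge
  rw [pvMergeFoldKeys, PySem.Dict.items_counter]
  simp [List.map_map, Function.comp_def]

-- value stored at c after one merge-fold step over the key k
theorem pvMergeStepGetD (w : List Char) (d : PySem.Dict Char Int) (k c : Char) :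
    (if d.contains k then
      if d.getD k 0 ≥ (PySem.Dict.counter w).getD k 0 then d
      else d.insert k (d.getD k 0 + ((PySem.Dict.counter w).getD k 0 - d.getD k 0))
    else d.insert k ((w.count k : Int))).getD c 0 =
      if c = k then max (d.getD c 0) ((w.count k : Int)) else d.getD c 0 := by
  rw [PySem.Dict.getD_counter]
  by_cases hck : c = k
  · subst hck
    rw [if_pos rfl]
    by_cases hc : d.contains c
    · rw [if_pos hc]
      by_cases hge : d.getD c 0 ≥ ((w.count c : Int))
      · rw [if_pos hge, max_eq_left hge]
      · rw [if_neg hge, PySem.Dict.getD_insert, if_pos rfl, max_eq_right (by omega)]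
        ring
    · have hcf : d.contains c = false := by simpa using hc
      rw [if_neg (by simp [hcf]), PySem.Dict.getD_insert, if_pos rfl,
          PySem.Dict.getD_of_not_contains d 0 hcf,
          max_eq_right (Int.natCast_nonneg _)]
  · rw [if_neg hck]
    split
    · split
      · rfl
      · rw [PySem.Dict.getD_insert, if_neg hck]
    · rw [PySem.Dict.getD_insert, if_neg hck]

theorem pvMergeFoldGetD (w : List Char) (S : List Char) (d : PySem.Dict Char Int) (c : Char)
    (hnd : S.Nodup) :
    (S.foldl (fun answer k =>
      if answer.contains k then
        if answer.getD k 0 ≥ (PySem.Dict.counter w).getD k 0 then answer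
        else answer.insert k (answer.getD k 0 + ((PySem.Dict.counter w).getD k 0 - answer.getD k 0))
      else answer.insert k ((w.count k : Int))) d).getD c 0 =
      if c ∈ S then max (d.getD c 0) ((w.count c : Int)) else d.getD c 0 := by
  induction S generalizing d with
  | nil => simp
  | cons k S ih =>
    have hk : k ∉ S := (List.nodup_cons.mp hnd).1
    have hS : S.Nodup := (List.nodup_cons.mp hnd).2
    rw [List.foldl_cons, ih _ hS]
    by_cases hck : c = k
    · subst hck
      simp only [List.mem_cons, true_or, if_true, if_neg hk, pvMergeStepGetD]
    · rw [pvMergeStepGetD]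
      simp [hck, List.mem_cons]

theorem pvMergeGetD (w : List Char) (d : PySem.Dict Char Int) (c : Char) :
    (pvMerge w d).getD c 0 =
      if c ∈ w then max (d.getD c 0) ((w.count c : Int)) else d.getD c 0 := by
  unfold pvMerge
  rw [PySem.Dict.items_counter, List.foldl_map, pvMergeFoldGetD w _ d c (PySem.Set.nodup_ofList w)]
  simp [PySem.Set.mem_ofList]

-- discarding an element already present in the accumulator does not change an update
theorem pvUpdateDiscard (x : Char) (u : List Char) (t : PySem.Set Char) (hx : x ∈ t) :
    PySem.Set.update t (PySem.Set.discard u x) = PySem.Set.update t u := by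
  induction u generalizing t with
  | nil => rfl
  | cons y u ih =>
    by_cases hyx : y = x
    · subst hyx
      have h1 : PySem.Set.discard (y :: u) y = PySem.Set.discard u y := by
        simp [PySem.Set.discard]
      rw [h1, ih t hx, PySem.Set.update_cons, PySem.Set.add_of_mem hx]
    · have h1 : PySem.Set.discard (y :: u) x = y :: PySem.Set.discard u x := by
        simp [PySem.Set.discard, hyx]
      rw [h1, PySem.Set.update_cons, PySem.Set.update_cons]
      exact ih _ ((PySem.Set.mem_add t y x).mpr (Or.inl hx))

-- updating with the deduplicated list is the same as updating with the list
theorem pvUpdateOfList (xs : List Char) (s : PySem.Set Char) :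
    PySem.Set.update s (PySem.Set.ofList xs) = PySem.Set.update s xs := by
  induction xs generalizing s with
  | nil => rfl
  | cons x xs ih =>
    rw [PySem.Set.ofList_cons, PySem.Set.update_cons, PySem.Set.update_cons]
    rw [pvUpdateDiscard x _ _ ((PySem.Set.mem_add s x x).mpr (Or.inr rfl))]
    exact ih _

-- the keys of A's dict after all words, as iterated set updates
theorem pvFoldKeys (ws : List String) (d : PySem.Dict Char Int) :
    (ws.foldl (fun a w => pvMerge w.toList a) d).keys =
      ws.foldl (fun s w => PySem.Set.update s w.toList) d.keys := by
  induction ws generalizing d with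
  | nil => rfl
  | cons w ws ih => rw [List.foldl_cons, List.foldl_cons, ih, pvMergeKeys, pvUpdateOfList]

theorem pvFoldKeysNodup (ws : List String) (s : PySem.Set Char) (h : s.Nodup) :
    (ws.foldl (fun s w => PySem.Set.update s w.toList) s).Nodup := by
  induction ws generalizing s with
  | nil => exact h
  | cons w ws ih => exact ih _ (PySem.Set.nodup_update _ _ h)

-- A's stored value for c after all words is the running max of the counts
theorem pvFoldGetD (ws : List String) (d : PySem.Dict Char Int) (c : Char) (h : 0 ≤ d.getD c 0) :
    (ws.foldl (fun a w => pvMerge w.toList a) d).getD c 0 =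
      ws.foldl (fun m w => max m ((w.toList.count c : Int))) (d.getD c 0) := by
  induction ws generalizing d with
  | nil => rfl
  | cons w ws ih =>
    rw [List.foldl_cons, List.foldl_cons]
    by_cases hc : c ∈ w.toList
    · have hg : (pvMerge w.toList d).getD c 0 = max (d.getD c 0) ((w.toList.count c : Int)) := by
        rw [pvMergeGetD, if_pos hc]
      rw [ih _ (by rw [hg]; exact le_trans h (le_max_left _ _)), hg]
    · have h0 : w.toList.count c = 0 := List.count_eq_zero.mpr hc
      have hg : (pvMerge w.toList d).getD c 0 = d.getD c 0 := by
        rw [pvMergeGetD, if_neg hc]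
      rw [ih _ (by rw [hg]; exact h), hg, h0]
      norm_num [max_eq_left h]

-- B's running-max loop is the same fold of maxes
theorem pvBestEq (ws : List String) (c : Char) (m0 : Int) :
    ws.foldl (fun best w =>
        if ((w.toList.count c : Int)) > best then (w.toList.count c : Int) else best) m0 =
      ws.foldl (fun m w => max m ((w.toList.count c : Int))) m0 := by
  induction ws generalizing m0 with
  | nil => rfl
  | cons w ws ih =>
    rw [List.foldl_cons, List.foldl_cons, ih]
    congr 1
    omega

-- B's seen-set is the same iterated update as A's key list
theorem pvSeenEq (ws : List String) (s : PySem.Set Char) :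
    ws.foldl (fun seen w => w.toList.foldl (fun s ch => PySem.Set.add s ch) seen) s =
      ws.foldl (fun s w => PySem.Set.update s w.toList) s := by
  rfl

-- A's outer loop over the words is the pvMerge fold
theorem pvWordLoopEq (words : List String) :
    words.foldl (fun answer word =>
      let temp : PySem.Dict Char Int :=
        word.toList.foldl (fun temp char =>
          if temp.contains char then temp.insert char (temp.getD char 0 + 1)
          else temp.insert char 1) PySem.Dict.empty
      temp.items.foldl (fun answer kv =>
        if answer.contains kv.1 then
          if answer.getD kv.1 0 ≥ temp.getD kv.1 0 then answer
          else answer.insert kv.1 (answer.getD kv.1 0 + (temp.getD kv.1 0 - answer.getD kv.1 0))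
        else answer.insert kv.1 kv.2) answer) PySem.Dict.empty
    = words.foldl (fun a w => pvMerge w.toList a) PySem.Dict.empty := by
  apply PySem.List.foldl_congr_mem
  intro a w _
  rw [pvTempEq]
  rfl

-- ===== VERDICT (by name: the statement is the Claim_ definition above) =====
theorem minimumCharactersForWords_spec : Claim_equal_minimumCharactersForWords := by
  intro words _
  show minimumCharactersForWords words = minimumCharactersForWords_alt words
  unfold minimumCharactersForWords minimumCharactersForWords_alt
  rw [pvWordLoopEq]
  dsimp only
  rw [pvSeenEq]
  set D := words.foldl (fun a w => pvMerge w.toList a) PySem.Dict.empty with hD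
  have hK : D.keys = words.foldl (fun s w => PySem.Set.update s w.toList) PySem.Set.empty := by
    rw [hD, pvFoldKeys]; rfl
  have hnd : D.keys.Nodup := by
    rw [hK]; exact pvFoldKeysNodup words _ List.nodup_nil
  rw [PySem.Dict.items_eq_map_keys D hnd 0]
  rw [PySem.List.foldl_append_eq_flatMap, List.flatMap_map,
      PySem.List.foldl_append_eq_flatMap]
  simp only [List.nil_append, List.map_flatMap]
  rw [hK]
  apply List.flatMap_congr
  intro c hc
  rw [pvBestEq]
  have hg : D.getD c 0 = words.foldl (fun m w => max m ((w.toList.count c : Int))) 0 := by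
    rw [hD, pvFoldGetD words _ c (by rw [PySem.Dict.getD_empty]), PySem.Dict.getD_empty]
  rw [hg, PySem.List.pyRepeat_singleton, PySem.List.pyRepeat_singleton, List.map_replicate]
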